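-- pv_equiv track=rewrite | github.com/owis1998/project-euler | problem 5/problem.py | fn
-- ===== SOURCE A (Python) =====
-- my_list = [i for i in range(2, 21)]
--
-- def fn(n):
--     if n == 0:
--         return False
--     for i in my_list:
--         if n % i != 0:
--             return False
--     else:
--         return True
-- ===== SOURCE B (Python) =====
-- def fn(n):
--     # LCM(2..20) = 232792560; n divisible by all of 2..20 iff by the LCM
--     return n != 0 and n % 232792560 == 0
-- ===== Notes on version B (the rewrite author's own statement) =====
-- stated objective: simpler
-- what changed: Replaces the loop over the divisors 2..20 with a single modulo check against their precomputed LCM 232792560.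
import Mathlib
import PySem

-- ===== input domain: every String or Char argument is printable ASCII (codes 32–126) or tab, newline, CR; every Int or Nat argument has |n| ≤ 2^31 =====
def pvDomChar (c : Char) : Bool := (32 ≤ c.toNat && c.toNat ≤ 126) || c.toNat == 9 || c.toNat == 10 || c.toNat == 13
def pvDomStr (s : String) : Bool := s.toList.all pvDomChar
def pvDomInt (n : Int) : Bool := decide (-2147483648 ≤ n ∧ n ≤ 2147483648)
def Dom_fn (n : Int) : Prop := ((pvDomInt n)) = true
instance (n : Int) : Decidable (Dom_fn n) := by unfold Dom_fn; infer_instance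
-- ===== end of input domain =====

-- B replaces A's loop over divisors 2..20 by one modulo check against their LCM 232792560 (simpler).

-- ===== PORT A =====
def pvMyList : List Int := PySem.List.pyRange 2 21 1

def fnLoop (n : Int) : List Int → Bool
  | [] => true
  | i :: rest => if PySem.Int.mod n i ≠ 0 then false else fnLoop n rest

def fn (n : Int) : Bool :=
  if n = 0 then false else fnLoop n pvMyList

-- ===== PORT B =====
def fn_alt (n : Int) : Bool :=
  n ≠ 0 && PySem.Int.mod n 232792560 = 0

-- ===== PRECONDITION & SPEC =====
def Spec_fn (n : Int) (out : Bool) : Prop := out = fn_alt n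
instance (n : Int) (out : Bool) : Decidable (Spec_fn n out) := by unfold Spec_fn; infer_instance

-- ===== CLAIM (what is proved, stated in full; the proofs are below) =====
def Claim_equal_fn : Prop := ∀ (n : Int), Dom_fn n → Spec_fn n (fn n)

-- ===== LEMMAS AND PROOFS =====

-- the loop returns true iff every listed divisor divides n
theorem fnLoop_true_iff (n : Int) (l : List Int) :
    fnLoop n l = true ↔ ∀ i ∈ l, i ∣ n := by
  induction l with
  | nil => simp [fnLoop]
  | cons i rest ih =>
    simp only [fnLoop]
    by_cases h : PySem.Int.mod n i = 0
    · simp [h, ih, (PySem.Int.mod_eq_zero_iff_dvd n i).mp h]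
    · simp only [h, if_pos, ne_eq, not_false_eq_true]
      constructor
      · intro hf; cases hf
      · intro hall
        exact absurd ((PySem.Int.mod_eq_zero_iff_dvd n i).mpr (hall i (List.mem_cons_self))) h

theorem dvd_of_coprime_parts (n : Int)
    (h16 : (16:Int) ∣ n) (h9 : (9:Int) ∣ n) (h5 : (5:Int) ∣ n) (h7 : (7:Int) ∣ n)
    (h11 : (11:Int) ∣ n) (h13 : (13:Int) ∣ n) (h17 : (17:Int) ∣ n) (h19 : (19:Int) ∣ n) :
    (232792560:Int) ∣ n := by
  have c1 : IsCoprime (16:Int) 9 := by rw [Int.isCoprime_iff_gcd_eq_one]; decide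
  have d1 : (144:Int) ∣ n := c1.mul_dvd h16 h9
  have c2 : IsCoprime (144:Int) 5 := by rw [Int.isCoprime_iff_gcd_eq_one]; decide
  have d2 : (720:Int) ∣ n := c2.mul_dvd d1 h5
  have c3 : IsCoprime (720:Int) 7 := by rw [Int.isCoprime_iff_gcd_eq_one]; decide
  have d3 : (5040:Int) ∣ n := c3.mul_dvd d2 h7
  have c4 : IsCoprime (5040:Int) 11 := by rw [Int.isCoprime_iff_gcd_eq_one]; decide
  have d4 : (55440:Int) ∣ n := c4.mul_dvd d3 h11
  have c5 : IsCoprime (55440:Int) 13 := by rw [Int.isCoprime_iff_gcd_eq_one]; decide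
  have d5 : (720720:Int) ∣ n := c5.mul_dvd d4 h13
  have c6 : IsCoprime (720720:Int) 17 := by rw [Int.isCoprime_iff_gcd_eq_one]; decide
  have d6 : (12252240:Int) ∣ n := c6.mul_dvd d5 h17
  have c7 : IsCoprime (12252240:Int) 19 := by rw [Int.isCoprime_iff_gcd_eq_one]; decide
  have d7 : (232792560:Int) ∣ n := c7.mul_dvd d6 h19
  exact d7

theorem all_iff_lcm (n : Int) :
    (∀ i ∈ pvMyList, i ∣ n) ↔ (232792560:Int) ∣ n := by
  have hlist : pvMyList = [2,3,4,5,6,7,8,9,10,11,12,13,14,15,16,17,18,19,20] := by decide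
  constructor
  · intro h
    rw [hlist] at h
    apply dvd_of_coprime_parts n
    · exact h 16 (by decide)
    · exact h 9 (by decide)
    · exact h 5 (by decide)
    · exact h 7 (by decide)
    · exact h 11 (by decide)
    · exact h 13 (by decide)
    · exact h 17 (by decide)
    · exact h 19 (by decide)
  · intro h i hi
    rw [hlist] at hi
    have : i ∣ (232792560:Int) := by
      fin_cases hi <;> decide
    exact this.trans h

-- ===== VERDICT (by name: the statement is the Claim_ definition above) =====
theorem fn_spec : Claim_equal_fn := by
  intro n _
  unfold Spec_fn fn fn_alt
  by_cases h0 : n = 0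
  · simp [h0]
  · simp only [h0, if_neg, ne_eq, not_false_eq_true, decide_true, Bool.true_and]
    by_cases hd : (232792560:Int) ∣ n
    · have := (all_iff_lcm n).mpr hd
      rw [(fnLoop_true_iff n pvMyList).mpr this]
      simp
      exact hd
    · have h1 : fnLoop n pvMyList ≠ true := by
        intro hc; exact hd ((all_iff_lcm n).mp ((fnLoop_true_iff n pvMyList).mp hc))
      have h2 : PySem.Int.mod n 232792560 ≠ 0 := fun hc =>
        hd ((PySem.Int.mod_eq_zero_iff_dvd n 232792560).mp hc)
      simp [Bool.not_eq_true] at h1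
      simp [h1]
      exact hd
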